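-- pv_equiv track=rewrite | github.com/pombase/allele_qc | dummy.py | get_other_index
-- ===== SOURCE A (Python) =====
-- def get_other_index(this_alignment, other_alignment, this_index):
--
--     count_other = -1
--     count_this = -1
--
--     for i in range(len(this_alignment)):
--         count_this += this_alignment[i] != '-'
--         count_other += other_alignment[i] != '-'
--         if count_this == this_index:
--             if other_alignment[i] == '-':
--                 return None
--             return count_other
--     # The coordinate does not exist in old one (new one is longer)
--     return None
-- ===== SOURCE B (Python) =====
-- def get_other_index(this_alignment, other_alignment, this_index):
--     # Phase 1: locate the alignment column of this_index in this_alignment only.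
--     count_this = -1
--     col = None
--     for i, ch in enumerate(this_alignment):
--         count_this += ch != '-'
--         if count_this == this_index:
--             col = i
--             break
--     if col is None:
--         return None
--     # Phase 2: read off the other sequence's ungapped index at that column.
--     if other_alignment[col] == '-':
--         return None
--     return sum(c != '-' for c in other_alignment[:col + 1]) - 1
-- ===== Notes on version B (the rewrite author's own statement) =====
-- stated objective: alternative
-- what changed: B separates the work into two phases - first scan this_alignment alone to find the target column, then count non-gap characters of other_alignment up to that column - instead of A's single loop maintaining both counters in lockstep.
import Mathlib
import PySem

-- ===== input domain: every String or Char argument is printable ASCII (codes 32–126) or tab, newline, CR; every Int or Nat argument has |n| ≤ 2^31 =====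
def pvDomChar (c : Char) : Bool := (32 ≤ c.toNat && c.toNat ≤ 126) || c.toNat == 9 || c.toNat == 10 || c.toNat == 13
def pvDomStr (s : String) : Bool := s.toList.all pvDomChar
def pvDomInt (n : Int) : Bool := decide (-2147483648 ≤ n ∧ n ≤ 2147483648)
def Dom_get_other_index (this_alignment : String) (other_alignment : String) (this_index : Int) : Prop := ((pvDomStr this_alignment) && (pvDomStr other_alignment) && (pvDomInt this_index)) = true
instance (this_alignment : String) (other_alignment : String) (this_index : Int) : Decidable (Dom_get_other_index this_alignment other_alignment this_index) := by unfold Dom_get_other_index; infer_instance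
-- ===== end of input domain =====

-- B splits A's lockstep double-counter loop into two phases: locate the target column in
-- this_alignment alone, then count non-gaps of other_alignment up to it (objective: alternative).


-- ===== PORT A =====
-- A's loop over i in range(len(this_alignment)), reading this[i] and other[i] in lockstep
-- while updating both counters; reading past the end of other_alignment (IndexError) is none.
def goA : List Char → List Char → Int → Int → Int → Option Int
  | [], _, _, _, _ => none
  | _ :: _, [], _, _, _ => none   -- other_alignment[i] raises IndexError
  | a :: t, b :: o, ti, ct, co =>
    let ct' := ct + (if a != '-' then 1 else 0)
    let co' := co + (if b != '-' then 1 else 0)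
    if ct' = ti then (if b = '-' then none else some co')
    else goA t o ti ct' co'

def get_other_index (this_alignment : String) (other_alignment : String) (this_index : Int) : Option Int :=
  goA this_alignment.toList other_alignment.toList this_index (-1) (-1)

-- ===== PORT B =====
-- Phase 1 of B: scan this_alignment only, return the column index of the hit (if any).
def findCol : List Char → Int → Int → Nat → Option Nat
  | [], _, _, _ => none
  | a :: t, ti, ct, i =>
    let ct' := ct + (if a != '-' then 1 else 0)
    if ct' = ti then some i else findCol t ti ct' (i + 1)

def get_other_index_alt (this_alignment : String) (other_alignment : String) (this_index : Int) : Option Int :=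
  match findCol this_alignment.toList this_index (-1) 0 with
  | none => none
  | some col =>
    match other_alignment.toList[col]? with
    | none => none   -- other_alignment[col] raises IndexError
    | some b =>
      if b = '-' then none
      else some (((other_alignment.toList.take (col + 1)).countP (· != '-') : Int) - 1)

-- ===== PRECONDITION & SPEC =====
-- Pre_ excludes exactly the inputs on which A raises IndexError: those where other_alignment is
-- shorter than this_alignment AND the target column (the first column i with
-- count-of-non-gaps(this_alignment[:i+1]) - 1 == this_index) does not occur before other_alignment
-- runs out, so A's loop reads other_alignment past its end.  On every input where A returns, Pre_ holds.
def Pre_get_other_index (this_alignment : String) (other_alignment : String) (this_index : Int) : Prop :=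
  this_alignment.toList.length ≤ other_alignment.toList.length ∨
    ∃ i < other_alignment.toList.length,
      ((this_alignment.toList.take (i + 1)).countP (· != '-') : Int) - 1 = this_index
instance (this_alignment : String) (other_alignment : String) (this_index : Int) : Decidable (Pre_get_other_index this_alignment other_alignment this_index) := by unfold Pre_get_other_index; infer_instance
def pvWitness_get_other_index : String × String × Int := ("A-C", "AC-", 1)

def Spec_get_other_index (this_alignment : String) (other_alignment : String) (this_index : Int) (out : Option Int) : Prop := out = get_other_index_alt this_alignment other_alignment this_index
instance (this_alignment : String) (other_alignment : String) (this_index : Int) (out : Option Int) : Decidable (Spec_get_other_index this_alignment other_alignment this_index out) := by unfold Spec_get_other_index; infer_instance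

-- ===== CLAIM (what is proved, stated in full; the proofs are below) =====
def Claim_equal_get_other_index : Prop := ∀ (this_alignment : String) (other_alignment : String) (this_index : Int), Dom_get_other_index this_alignment other_alignment this_index → Pre_get_other_index this_alignment other_alignment this_index → Spec_get_other_index this_alignment other_alignment this_index (get_other_index this_alignment other_alignment this_index)
-- ===== LEMMAS AND PROOFS =====

-- B's phase 2, as a function of the full other list and the found column.
def phase2 (ol : List Char) (col : Nat) : Option Int :=
  match ol[col]? with
  | none => none
  | some b =>
    if b = '-' then none
    else some (((ol.take (col + 1)).countP (· != '-') : Int) - 1)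

lemma alt_eq (t o : String) (ti : Int) :
    get_other_index_alt t o ti =
      match findCol t.toList ti (-1) 0 with
      | none => none
      | some col => phase2 o.toList col := by
  unfold get_other_index_alt phase2
  cases findCol t.toList ti (-1) 0 <;> rfl

lemma findCol_ge : ∀ (t : List Char) (ti ct : Int) (s col : Nat),
    findCol t ti ct s = some col → s ≤ col := by
  intro t
  induction t with
  | nil => intro ti ct s col h; simp [findCol] at h
  | cons a t ih =>
    intro ti ct s col h
    simp only [findCol] at h
    split at h <;> split at h <;>
      first
        | (injection h with h; omega)
        | (have := ih _ _ _ _ h; omega)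

-- Main invariant: running A's loop on suffixes (t, o) of the full strings, with the other-side
-- counter co equal to (non-gap count of the consumed prefix of other) - 1, agrees with
-- B's two-phase decomposition (both ports return none where their Python raises).
lemma goA_eq (t : List Char) : ∀ (pre o : List Char) (ti ct : Int),
    goA t o ti ct (((pre.countP (· != '-')) : Int) - 1) =
      match findCol t ti ct pre.length with
      | none => none
      | some col => phase2 (pre ++ o) col := by
  induction t with
  | nil =>
    intro pre o ti ct
    simp [goA, findCol]
  | cons a t ih =>
    intro pre o ti ct
    cases o with
    | nil =>
      simp only [goA]
      cases h : findCol (a :: t) ti ct pre.length with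
      | none => rfl
      | some col =>
        have hge := findCol_ge _ _ _ _ _ h
        simp [phase2, List.getElem?_eq_none (by simpa using hge)]
    | cons b o =>
      simp only [goA, findCol]
      have hget : (pre ++ b :: o)[pre.length]? = some b := by simp
      have htake : (pre ++ b :: o).take (pre.length + 1) = pre ++ [b] := by
        rw [List.take_append]; simp
      by_cases hct : ct + (if a != '-' then 1 else 0) = ti
      · rw [if_pos hct, if_pos hct]
        by_cases hb : b = '-'
        · simp [phase2, hb]
        · have hbne : (b != '-') = true := by simp [hb]
          simp only [phase2, hget, if_neg hb, htake]
          rw [List.countP_append]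
          simp only [List.countP_cons, List.countP_nil, hbne]
          congr 1
          push_cast
          omega
      · rw [if_neg hct, if_neg hct]
        have := ih (pre ++ [b]) o ti (ct + (if a != '-' then 1 else 0))
        rw [List.countP_append] at this
        have hcnt : ((pre.countP (· != '-') + [b].countP (· != '-') : Nat) : Int) - 1
            = ((pre.countP (· != '-') : Nat) : Int) - 1 + (if b != '-' then 1 else 0) := by
          by_cases hb : (b != '-') = true
          · simp [hb]
          · simp [hb]
        rw [hcnt] at this
        simpa using this

-- ===== VERDICT (by name: the statement is the Claim_ definition above) =====
theorem get_other_index_spec : Claim_equal_get_other_index := by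
  intro t o ti _ _
  unfold Spec_get_other_index get_other_index
  rw [alt_eq]
  have := goA_eq t.toList [] o.toList ti (-1)
  simpa using this
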